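-- pv_equiv track=rewrite | github.com/raeez/chiral-bar-cobar | compute/lib/cy_bps_spectrum_k3e_engine.py | count_primitive_charges
-- ===== SOURCE A (Python) =====
-- import math
--
-- def count_primitive_charges(Delta: int) -> int:
--     r"""Count the number of primitive charge representatives at discriminant Delta.
--
--     A charge (n, l, m) is primitive if gcd(n, l, m) = 1.
--     The number of such charges with 4nm - l^2 = Delta (modulo
--     equivalence under O(6,22;Z)) determines the BPS multiplicity.
--
--     For PRIMITIVE charges, the BPS index depends only on Delta.
--     For non-primitive charges (gcd > 1), there are additional
--     contributions from multi-particle states.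
--
--     We count the number of positive-definite half-integral matrices
--     T = ((n, l/2), (l/2, m)) with det(2T) = Delta and gcd(n, l, m) = 1.
--     """
--     count = 0
--     # Delta = 4nm - l^2 >= 0
--     # n >= 1, m >= 1 (positive definite), l arbitrary
--     l_max = int(math.sqrt(max(0, Delta))) + 1
--     for l in range(-l_max, l_max + 1):
--         remainder = Delta + l * l
--         if remainder <= 0 or remainder % 4 != 0:
--             continue
--         nm = remainder // 4
--         # Factor nm = n * m with n >= 1, m >= 1
--         for n in range(1, nm + 1):
--             if nm % n != 0:
--                 continue
--             m = nm // n
--             if math.gcd(math.gcd(abs(n), abs(l)), abs(m)) == 1: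
--                 count += 1
--     return count
-- ===== SOURCE B (Python) =====
-- from math import gcd, isqrt
--
--
-- def count_primitive_charges(Delta: int) -> int:
--     """Count primitive positive-definite charges at discriminant Delta.
--
--     Same result as the original, computed differently: only l >= 0 is
--     considered (the l -> -l symmetry doubles every l > 0 contribution), and
--     for each admissible l the factorisations nm = d * e are found in two
--     staged passes: first collect the factor pairs with d <= isqrt(nm),
--     then sum the primitive pairs' weights (single when d == e, else double).
--     """
--     def weight(l: int) -> int:
--         r = Delta + l * l
--         if r <= 0 or r % 4 != 0:
--             return 0
--         nm = r // 4
--         pairs = [(d, nm // d) for d in range(1, isqrt(nm) + 1) if nm % d == 0]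
--         return sum((1 if d == e else 2)
--                    for (d, e) in pairs if gcd(gcd(d, l), e) == 1)
--
--     l_max = isqrt(max(0, Delta)) + 1
--     return weight(0) + 2 * sum(weight(l) for l in range(1, l_max + 1))
-- ===== Notes on version B (the rewrite author's own statement) =====
-- stated objective: alternative
-- what changed: B scans only the non-negative half of the l-range (doubling each positive-l contribution by the l <-> -l symmetry) and, per l, replaces A's trial loop over every candidate n up to nm by two staged passes: build the list of factor pairs (d, nm//d) with d at most isqrt(nm), then sum the primitive pairs' weights (single when d equals its cofactor, double otherwise).
import Mathlib
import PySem

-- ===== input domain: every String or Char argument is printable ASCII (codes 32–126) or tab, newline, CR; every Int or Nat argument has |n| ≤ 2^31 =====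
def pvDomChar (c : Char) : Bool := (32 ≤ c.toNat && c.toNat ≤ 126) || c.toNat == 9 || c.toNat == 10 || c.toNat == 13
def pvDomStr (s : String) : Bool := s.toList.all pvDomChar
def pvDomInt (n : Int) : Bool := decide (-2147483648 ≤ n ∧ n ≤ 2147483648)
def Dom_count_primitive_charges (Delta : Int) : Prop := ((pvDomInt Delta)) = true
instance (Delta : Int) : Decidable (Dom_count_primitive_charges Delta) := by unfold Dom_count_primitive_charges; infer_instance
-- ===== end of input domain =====

-- B scans only the non-negative half of the l-range (doubling each l > 0 contribution by the
-- l ↔ -l symmetry) and, per l, replaces A's trial loop over all n ≤ nm by two staged passes: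
-- collect the factor pairs (d, nm // d) with d ≤ isqrt(nm), then sum the primitive pairs' weights
-- (single when d equals its cofactor, double otherwise); same return value by the divisor-pair bijection d ↔ nm / d.

-- ===== PORT A =====
-- int(math.sqrt(max(0, Delta))): exact integer sqrt for the |Delta| ≤ 2^31 domain
-- (CPython's correctly-rounded float sqrt cannot cross an integer there), ported as Nat.sqrt.
def count_primitive_charges (Delta : Int) : Int :=
  let l_max : Int := (Nat.sqrt (max 0 Delta).toNat : Int) + 1
  (PySem.List.pyRange (-l_max) (l_max + 1) 1).foldl (fun count l =>
    let remainder := Delta + l * l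
    if remainder ≤ 0 ∨ PySem.Int.mod remainder 4 ≠ 0 then count
    else
      let nm := PySem.Int.floordiv remainder 4
      (PySem.List.pyRange 1 (nm + 1) 1).foldl (fun count n =>
        if PySem.Int.mod nm n ≠ 0 then count
        else
          let m := PySem.Int.floordiv nm n
          if Nat.gcd (Nat.gcd n.natAbs l.natAbs) m.natAbs = 1 then count + 1
          else count) count) 0

-- ===== PORT B =====
-- the 'weight' closure of Source B (Delta passed explicitly)
def pcWeight (Delta l : Int) : Int :=
  let r := Delta + l * l
  if r ≤ 0 ∨ PySem.Int.mod r 4 ≠ 0 then 0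
  else
    let nm := PySem.Int.floordiv r 4
    let pairs := ((PySem.List.pyRange 1 ((Nat.sqrt nm.toNat : Int) + 1) 1).filter
        (fun d => PySem.Int.mod nm d == 0)).map (fun d => (d, PySem.Int.floordiv nm d))
    ((pairs.filter (fun p => Nat.gcd (Nat.gcd p.1.natAbs l.natAbs) p.2.natAbs == 1)).map
        (fun p => if p.1 = p.2 then (1 : Int) else 2)).sum

def count_primitive_charges_alt (Delta : Int) : Int :=
  let l_max : Int := (Nat.sqrt (max 0 Delta).toNat : Int) + 1
  pcWeight Delta 0 + 2 * ((PySem.List.pyRange 1 (l_max + 1) 1).map (pcWeight Delta)).sum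

-- ===== PRECONDITION & SPEC =====
def Spec_count_primitive_charges (Delta : Int) (out : Int) : Prop := out = count_primitive_charges_alt Delta
instance (Delta : Int) (out : Int) : Decidable (Spec_count_primitive_charges Delta out) := by unfold Spec_count_primitive_charges; infer_instance

-- ===== CLAIM (what is proved, stated in full; the proofs are below) =====
def Claim_equal_count_primitive_charges : Prop := ∀ (Delta : Int), Dom_count_primitive_charges Delta → Spec_count_primitive_charges Delta (count_primitive_charges Delta)

-- ===== LEMMAS AND PROOFS =====

-- the 0/1 contribution of the factorisation nm = d * (nm / d) for a divisor d
def cFac (N labs d : ℕ) : Int :=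
  if Nat.gcd (Nat.gcd d labs) (N / d) = 1 then 1 else 0

-- value of A's inner loop: one term per divisor of N
def sumA (N labs : ℕ) : Int := ∑ d ∈ N.divisors, cFac N labs d

-- value of B's staged passes: divisors up to √N, weighted 1 or 2
def sumB (N labs : ℕ) : Int :=
  ∑ d ∈ N.divisors with d ≤ Nat.sqrt N, cFac N labs d * (if d = N / d then 1 else 2)

-- the contribution of one value of l to A's outer loop
def outerTerm (Delta l : Int) : Int :=
  if Delta + l * l ≤ 0 ∨ PySem.Int.mod (Delta + l * l) 4 ≠ 0 then 0
  else sumA (PySem.Int.floordiv (Delta + l * l) 4).toNat l.natAbs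

lemma sum_map_range (n : ℕ) (f : ℕ → Int) :
    ((List.range n).map f).sum = ∑ i ∈ Finset.range n, f i := Int.neg_inj.mp rfl

lemma cFac_div (N labs d : ℕ) (hd : d ∣ N) (hN : N ≠ 0) :
    cFac N labs (N / d) = cFac N labs d := by
  unfold cFac
  rw [Nat.div_div_self hd hN]
  simp [Nat.gcd_comm, Nat.gcd_left_comm]

lemma sumA_eq_sumB (N labs : ℕ) : sumA N labs = sumB N labs := by
  by_cases hN : N = 0
  · subst hN; simp [sumA, sumB]
  rw [sumA, ← Finset.sum_filter_add_sum_filter_not N.divisors (· ≤ Nat.sqrt N), sumB]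
  have hsplit : ∀ d : ℕ, cFac N labs d * (if d = N / d then 1 else 2)
      = cFac N labs d + (if ¬ d = N / d then cFac N labs d else 0) := by
    intro d; split_ifs <;> ring
  rw [Finset.sum_congr rfl (fun d _ => hsplit d), Finset.sum_add_distrib,
    ← Finset.sum_filter (fun d => ¬ d = N / d) (cFac N labs)]
  congr 1
  rw [Finset.filter_filter]
  refine Finset.sum_nbij' (fun d => N / d) (fun d => N / d) ?_ ?_ ?_ ?_ ?_
  · intro e he
    simp only [Finset.mem_filter, Nat.mem_divisors] at he ⊢
    obtain ⟨⟨hdvd, _⟩, hbig⟩ := he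
    have hepos : 0 < e := Nat.pos_of_ne_zero (by rintro rfl; exact hN (Nat.eq_zero_of_zero_dvd hdvd))
    have hNe : N < e * e := by
      have := (Nat.sqrt_lt').mp (by omega : Nat.sqrt N < e)
      simpa [pow_two] using this
    have hlt : N / e < e := (Nat.div_lt_iff_lt_mul hepos).mpr hNe
    have hmul : N / e * e = N := Nat.div_mul_cancel hdvd
    refine ⟨⟨Nat.div_dvd_of_dvd hdvd, hN⟩, ?_, ?_⟩
    · refine Nat.le_sqrt.mpr ?_
      calc N / e * (N / e) ≤ N / e * e := Nat.mul_le_mul_left _ (le_of_lt hlt)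
        _ = N := hmul
    · rw [Nat.div_div_self hdvd hN]; exact Nat.ne_of_lt hlt
  · intro d hd
    simp only [Finset.mem_filter, Nat.mem_divisors] at hd ⊢
    obtain ⟨⟨hdvd, _⟩, hsmall, hne⟩ := hd
    have hdpos : 0 < d := Nat.pos_of_ne_zero (by rintro rfl; exact hN (Nat.eq_zero_of_zero_dvd hdvd))
    have hdd : d * d ≤ N := Nat.le_sqrt.mp hsmall
    have hled : d ≤ N / d := (Nat.le_div_iff_mul_le hdpos).mpr hdd
    have hlt : d < N / d := lt_of_le_of_ne hled (by omega)
    have hmul : d * (N / d) = N := Nat.mul_div_cancel' hdvd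
    refine ⟨⟨Nat.div_dvd_of_dvd hdvd, hN⟩, ?_⟩
    have hlt2 : N < (N / d) * (N / d) := by
      calc N = d * (N / d) := hmul.symm
        _ < (N / d) * (N / d) := by
            exact Nat.mul_lt_mul_of_lt_of_le hlt (le_refl _) (by omega)
    exact Nat.not_le.mpr ((Nat.sqrt_lt').mpr (by simpa [pow_two] using hlt2))
  · intro e he
    simp only [Finset.mem_filter, Nat.mem_divisors] at he
    exact Nat.div_div_self he.1.1 hN
  · intro d hd
    simp only [Finset.mem_filter, Nat.mem_divisors] at hd
    exact Nat.div_div_self hd.1.1 hN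
  · intro e he
    simp only [Finset.mem_filter, Nat.mem_divisors] at he
    exact (cFac_div N labs e he.1.1 hN).symm

lemma innerA_eq (N labs : ℕ) (c : Int) :
    (PySem.List.pyRange 1 ((N : Int) + 1) 1).foldl (fun count n =>
        if PySem.Int.mod (N : Int) n ≠ 0 then count
        else
          let m := PySem.Int.floordiv (N : Int) n
          if Nat.gcd (Nat.gcd n.natAbs labs) m.natAbs = 1 then count + 1
          else count) c = c + sumA N labs := by
  rw [List.foldl_ext _ (fun count n => count +
      (if PySem.Int.mod (N : Int) n ≠ 0 then 0
       else if Nat.gcd (Nat.gcd n.natAbs labs) (PySem.Int.floordiv (N : Int) n).natAbs = 1 then 1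
       else 0)) c (by intro a b _; dsimp only; split_ifs <;> ring)]
  rw [PySem.List.foldl_add]
  congr 1
  rw [PySem.List.pyRange_one]
  have h1 : ((N : Int) + 1 - 1).toNat = N := by omega
  rw [h1, List.map_map, sum_map_range]
  have hdiv : sumA N labs
      = ∑ k ∈ Finset.range N, (if (1 + k) ∣ N then cFac N labs (1 + k) else 0) := by
    rw [sumA, show N.divisors = Finset.filter (· ∣ N) (Finset.Ico 1 (N + 1)) from Finset.val_inj.mp rfl,
      Finset.sum_filter, Finset.sum_Ico_eq_sum_range]
    simp
  rw [hdiv]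
  refine Finset.sum_congr rfl (fun k _ => ?_)
  have hcast : (1 : Int) + (k : Int) = ((1 + k : ℕ) : Int) := by push_cast; ring
  simp only [Function.comp, hcast, PySem.Int.mod_natCast, PySem.Int.floordiv_natCast,
    Int.natAbs_natCast, cFac]
  simp only [ne_eq, ite_not, Int.natCast_eq_zero, Nat.dvd_iff_mod_eq_zero]

-- sum of a map over a filter, as a map of guarded terms
lemma sum_map_filter (xs : List Int) (q : Int → Bool) (f : Int → Int) :
    ((xs.filter q).map f).sum = (xs.map (fun x => if q x then f x else 0)).sum := by
  induction xs with
  | nil => rfl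
  | cons x xs ih =>
    by_cases hq : q x <;> simp [hq, ih]

-- value of B's two staged passes, as the weighted divisor sum sumB
lemma stagedB_eq (N labs : ℕ) :
    ((((((PySem.List.pyRange 1 ((Nat.sqrt N : Int) + 1) 1).filter
            (fun d => PySem.Int.mod (N : Int) d == 0)).map
            (fun d => (d, PySem.Int.floordiv (N : Int) d))).filter
          (fun p => Nat.gcd (Nat.gcd p.1.natAbs labs) p.2.natAbs == 1)).map
        (fun p => if p.1 = p.2 then (1 : Int) else 2)).sum) = sumB N labs := by
  rw [List.filter_map, List.map_map, List.filter_filter, sum_map_filter,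
    PySem.List.pyRange_one]
  have h1 : (((Nat.sqrt N : ℕ) : Int) + 1 - 1).toNat = Nat.sqrt N := by omega
  rw [h1, List.map_map, sum_map_range]
  have hdiv : sumB N labs
      = ∑ k ∈ Finset.range (Nat.sqrt N),
          (if (1 + k) ∣ N then cFac N labs (1 + k) * (if 1 + k = N / (1 + k) then 1 else 2) else 0) := by
    rw [sumB]
    have hset : N.divisors.filter (· ≤ Nat.sqrt N)
        = Finset.filter (· ∣ N) (Finset.Ico 1 (Nat.sqrt N + 1)) := by
      ext d
      simp only [Finset.mem_filter, Nat.mem_divisors, Finset.mem_Ico]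
      constructor
      · rintro ⟨⟨hdvd, hN⟩, hle⟩
        have : 0 < d := Nat.pos_of_ne_zero (by rintro rfl; exact hN (Nat.eq_zero_of_zero_dvd hdvd))
        exact ⟨⟨by omega, by omega⟩, hdvd⟩
      · rintro ⟨⟨h1d, h2d⟩, hdvd⟩
        have hN : N ≠ 0 := by
          rintro rfl; simp [Nat.sqrt_zero] at h1d h2d; omega
        exact ⟨⟨hdvd, hN⟩, by omega⟩
    rw [hset, Finset.sum_filter, Finset.sum_Ico_eq_sum_range]
    simp
  rw [hdiv]
  refine Finset.sum_congr rfl (fun k _ => ?_)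
  have hcast : (1 : Int) + (k : Int) = ((1 + k : ℕ) : Int) := by push_cast; ring
  simp only [Function.comp, hcast, PySem.Int.mod_natCast, PySem.Int.floordiv_natCast,
    Int.natAbs_natCast, cFac, Nat.cast_inj, Bool.and_eq_true, beq_iff_eq,
    Int.natCast_eq_zero, Nat.dvd_iff_mod_eq_zero]
  by_cases hd : N % (1 + k) = 0 <;> by_cases hg : Nat.gcd (Nat.gcd (1 + k) labs) (N / (1 + k)) = 1 <;>
    simp [hd, hg]

lemma pcWeight_eq (Delta l : Int) : pcWeight Delta l = outerTerm Delta l := by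
  unfold pcWeight outerTerm
  by_cases hc : Delta + l * l ≤ 0 ∨ PySem.Int.mod (Delta + l * l) 4 ≠ 0
  · rw [if_pos hc, if_pos hc]
  · rw [if_neg hc, if_neg hc]
    have hpos : 0 < Delta + l * l := by
      have h1 := (not_or.mp hc).1; omega
    have hnn : 0 ≤ PySem.Int.floordiv (Delta + l * l) 4 := by
      rw [PySem.Int.floordiv_eq_ediv_of_pos (by norm_num)]
      exact Int.ediv_nonneg (le_of_lt hpos) (by norm_num)
    rw [← Int.toNat_of_nonneg hnn]
    simp only [Int.toNat_natCast]
    rw [stagedB_eq, ← sumA_eq_sumB]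

lemma outerTerm_neg (Delta l : Int) : outerTerm Delta (-l) = outerTerm Delta l := by
  simp [outerTerm]

lemma sum_sym (h : Int → Int) (he : ∀ x, h (-x) = h x) (L : ℕ) :
    ∑ k ∈ Finset.range (2 * L + 1), h ((k : Int) - (L : Int))
      = ∑ k ∈ Finset.range (L + 1), (if k = 0 then h 0 else 2 * h (k : Int)) := by
  induction L with
  | zero => simp
  | succ L ih =>
    have e1 : 2 * (L + 1) + 1 = (2 * L + 1) + 1 + 1 := by ring
    rw [e1, Finset.sum_range_succ, Finset.sum_range_succ']
    have e2 : ∀ k, h ((k + 1 : ℕ) - ((L + 1 : ℕ) : Int)) = h ((k : Int) - (L : Int)) := by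
      intro k; congr 1; push_cast; ring
    rw [Finset.sum_congr rfl (fun k _ => e2 k), ih]
    have e3 : h (((0 : ℕ) : Int) - ((L + 1 : ℕ) : Int)) = h ((L + 1 : ℕ)) := by
      rw [show ((0 : ℕ) : Int) - ((L + 1 : ℕ) : Int) = -((L + 1 : ℕ) : Int) by push_cast; ring, he]
    have e4 : ((2 * L + 1 + 1 : ℕ) : Int) - ((L + 1 : ℕ) : Int) = ((L + 1 : ℕ) : Int) := by
      push_cast; ring
    rw [e3, e4]
    conv_rhs => rw [Finset.sum_range_succ]
    rw [if_neg (by omega : ¬ (L + 1 = 0))]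
    ring

lemma outerA_eq (Delta : Int) :
    count_primitive_charges Delta
      = ∑ k ∈ Finset.range (2 * (Nat.sqrt (max 0 Delta).toNat + 1) + 1),
          outerTerm Delta ((k : Int) - ((Nat.sqrt (max 0 Delta).toNat + 1 : ℕ) : Int)) := by
  unfold count_primitive_charges
  rw [List.foldl_ext _ (fun count l => count + outerTerm Delta l) 0 ?hext]
  case hext =>
    intro c l _
    dsimp only
    by_cases hc : Delta + l * l ≤ 0 ∨ PySem.Int.mod (Delta + l * l) 4 ≠ 0
    · rw [if_pos hc, outerTerm, if_pos hc]; ring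
    · rw [if_neg hc, outerTerm, if_neg hc]
      have hpos : 0 < Delta + l * l := by
        have h1 := (not_or.mp hc).1; omega
      have hnn : 0 ≤ PySem.Int.floordiv (Delta + l * l) 4 := by
        rw [PySem.Int.floordiv_eq_ediv_of_pos (by norm_num)]
        exact Int.ediv_nonneg (le_of_lt hpos) (by norm_num)
      rw [← Int.toNat_of_nonneg hnn]
      exact innerA_eq _ _ c
  rw [PySem.List.foldl_add, PySem.List.pyRange_one, zero_add]
  have h1 : (((Nat.sqrt (max 0 Delta).toNat : ℕ) : Int) + 1 + 1 - -(((Nat.sqrt (max 0 Delta).toNat : ℕ) : Int) + 1)).toNat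
      = 2 * (Nat.sqrt (max 0 Delta).toNat + 1) + 1 := by omega
  rw [h1, List.map_map, sum_map_range]
  refine Finset.sum_congr rfl (fun k _ => ?_)
  show outerTerm Delta _ = _
  congr 1

lemma outerB_eq (Delta : Int) :
    count_primitive_charges_alt Delta
      = ∑ k ∈ Finset.range ((Nat.sqrt (max 0 Delta).toNat + 1) + 1),
          (if k = 0 then outerTerm Delta 0 else 2 * outerTerm Delta (k : Int)) := by
  unfold count_primitive_charges_alt
  rw [Finset.sum_range_succ']
  simp only [Nat.cast_add, Nat.cast_one, if_neg (Nat.succ_ne_zero _)]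
  rw [← Finset.mul_sum]
  rw [pcWeight_eq, PySem.List.pyRange_one]
  have h1 : (((Nat.sqrt (max 0 Delta).toNat : ℕ) : Int) + 1 + 1 - 1).toNat
      = Nat.sqrt (max 0 Delta).toNat + 1 := by omega
  rw [h1, List.map_map, sum_map_range]
  have h2 : ∀ k : ℕ, (pcWeight Delta ∘ fun i : ℕ => 1 + (i : Int)) k
      = outerTerm Delta ((k : Int) + 1) := by
    intro k
    simp only [Function.comp, pcWeight_eq]
    congr 1; ring
  rw [Finset.sum_congr rfl (fun k _ => h2 k)]
  simp only [if_true]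
  ring

-- ===== VERDICT (by name: the statement is the Claim_ definition above) =====
theorem count_primitive_charges_spec : Claim_equal_count_primitive_charges := by
  intro Delta _
  show _ = _
  rw [outerA_eq, outerB_eq, sum_sym (outerTerm Delta) (outerTerm_neg Delta)]
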